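-- pv_equiv track=rewrite | github.com/augchan42/king-wen-agi-framework | paper/generate_plots.py | calculate_transition_metrics
-- ===== SOURCE A (Python) =====
-- def calculate_nuclear_distance(bin1, bin2):
--     """Calculate Hamming distance between nuclear hexagrams (inner four lines)."""
--     nuc1 = bin1[1:5]
--     nuc2 = bin2[1:5]
--     return sum(n1 != n2 for n1, n2 in zip(nuc1, nuc2))
--
-- def calculate_transition_metrics(bin1, bin2):
--     """Calculate Hamming, trigram, and nuclear distances between two hexagrams."""
--     d1 = sum(b1 != b2 for b1, b2 in zip(bin1, bin2))
--     upper1, lower1 = bin1[:3], bin1[3:]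
--     upper2, lower2 = bin2[:3], bin2[3:]
--     d2 = sum(b1 != b2 for b1, b2 in zip(upper1, upper2)) + \
--          sum(b1 != b2 for b1, b2 in zip(lower1, lower2))
--     d3 = calculate_nuclear_distance(bin1, bin2)
--     return d1, d2, d3
-- ===== SOURCE B (Python) =====
-- def calculate_transition_metrics(bin1, bin2):
--     """Calculate Hamming, trigram, and nuclear distances between two hexagrams."""
--     diffs = [b1 != b2 for b1, b2 in zip(bin1, bin2)]
--     d1 = sum(diffs)
--     # trigram distance: upper-slice diffs plus lower-slice diffs recombine to the whole list
--     d3 = sum(diffs[1:5])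
--     return d1, d1, d3
-- ===== Notes on version B (the rewrite author's own statement) =====
-- stated objective: simpler
-- what changed: B builds one shared difference table from a single zip and derives all three metrics from it (full sum, the same sum reused for the trigram split since the two halves recombine, and the sum of the [1:5] slice), replacing A's four separate slice-and-zip passes and its helper.
import Mathlib
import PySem

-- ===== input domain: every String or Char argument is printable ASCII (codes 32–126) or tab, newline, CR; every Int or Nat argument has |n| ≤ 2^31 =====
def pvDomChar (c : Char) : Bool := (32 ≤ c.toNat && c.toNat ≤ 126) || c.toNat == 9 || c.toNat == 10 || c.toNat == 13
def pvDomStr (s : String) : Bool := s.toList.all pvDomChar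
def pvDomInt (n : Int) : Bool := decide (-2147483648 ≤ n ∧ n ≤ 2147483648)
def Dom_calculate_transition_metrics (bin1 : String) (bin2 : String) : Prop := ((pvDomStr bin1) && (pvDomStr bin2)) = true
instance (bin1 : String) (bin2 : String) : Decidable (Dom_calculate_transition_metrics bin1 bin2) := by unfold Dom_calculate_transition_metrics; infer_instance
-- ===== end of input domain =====

-- B derives all three metrics from one shared difference table instead of four separate slice-and-zip passes (objective: simpler).

-- ===== PORT A =====
def calculate_nuclear_distance (bin1 : String) (bin2 : String) : Int :=
  let nuc1 := PySem.List.slice bin1.toList (some 1) (some 5)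
  let nuc2 := PySem.List.slice bin2.toList (some 1) (some 5)
  ((nuc1.zip nuc2).map (fun p => if p.1 ≠ p.2 then (1 : Int) else 0)).sum

def calculate_transition_metrics (bin1 : String) (bin2 : String) : Int × Int × Int :=
  let d1 := ((bin1.toList.zip bin2.toList).map (fun p => if p.1 ≠ p.2 then (1 : Int) else 0)).sum
  let upper1 := PySem.List.slice bin1.toList none (some 3)
  let lower1 := PySem.List.slice bin1.toList (some 3) none
  let upper2 := PySem.List.slice bin2.toList none (some 3)
  let lower2 := PySem.List.slice bin2.toList (some 3) none
  let d2 := ((upper1.zip upper2).map (fun p => if p.1 ≠ p.2 then (1 : Int) else 0)).sum +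
            ((lower1.zip lower2).map (fun p => if p.1 ≠ p.2 then (1 : Int) else 0)).sum
  let d3 := calculate_nuclear_distance bin1 bin2
  (d1, d2, d3)

-- ===== PORT B =====
def calculate_transition_metrics_alt (bin1 : String) (bin2 : String) : Int × Int × Int :=
  let diffs := (bin1.toList.zip bin2.toList).map (fun p => decide (p.1 ≠ p.2))
  let d1 := (diffs.map (fun b => if b then (1 : Int) else 0)).sum
  let d3 := ((PySem.List.slice diffs (some 1) (some 5)).map (fun b => if b then (1 : Int) else 0)).sum
  (d1, d1, d3)

-- ===== PRECONDITION & SPEC =====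
def Spec_calculate_transition_metrics (bin1 : String) (bin2 : String) (out : Int × Int × Int) : Prop := out = calculate_transition_metrics_alt bin1 bin2
instance (bin1 : String) (bin2 : String) (out : Int × Int × Int) : Decidable (Spec_calculate_transition_metrics bin1 bin2 out) := by unfold Spec_calculate_transition_metrics; infer_instance

-- ===== CLAIM (what is proved, stated in full; the proofs are below) =====
def Claim_equal_calculate_transition_metrics : Prop := ∀ (bin1 : String) (bin2 : String), Dom_calculate_transition_metrics bin1 bin2 → Spec_calculate_transition_metrics bin1 bin2 (calculate_transition_metrics bin1 bin2)

-- ===== LEMMAS AND PROOFS =====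

theorem zip_take_eq {α β : Type} (xs : List α) (ys : List β) (n : Nat) :
    (xs.take n).zip (ys.take n) = (xs.zip ys).take n := by
  induction xs generalizing ys n with
  | nil => simp
  | cons x xs ih =>
    cases ys with
    | nil => simp
    | cons y ys =>
      cases n with
      | zero => simp
      | succ m => simp [List.zip_cons_cons, ih]

theorem zip_drop_eq {α β : Type} (xs : List α) (ys : List β) (n : Nat) :
    (xs.drop n).zip (ys.drop n) = (xs.zip ys).drop n := by
  induction xs generalizing ys n with
  | nil => simp
  | cons x xs ih =>
    cases ys with
    | nil => simp
    | cons y ys =>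
      cases n with
      | zero => simp
      | succ m => simp [List.zip_cons_cons, ih]

theorem sum_map_take_drop {α : Type} (f : α → Int) (Z : List α) (n : Nat) :
    ((Z.take n).map f).sum + ((Z.drop n).map f).sum = (Z.map f).sum := by
  conv_rhs => rw [← List.take_append_drop n Z]
  rw [List.map_append, List.sum_append]

-- ===== VERDICT (by name: the statement is the Claim_ definition above) =====
theorem calculate_transition_metrics_spec : Claim_equal_calculate_transition_metrics := by
  intro bin1 bin2 _
  show calculate_transition_metrics bin1 bin2 = calculate_transition_metrics_alt bin1 bin2
  unfold calculate_transition_metrics calculate_transition_metrics_alt calculate_nuclear_distance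
  have hfun : ((fun b => if b = true then (1 : Int) else 0) ∘
      fun p : Char × Char => decide (p.1 ≠ p.2)) =
      fun p : Char × Char => if p.1 ≠ p.2 then (1 : Int) else 0 := by
    funext p; by_cases h : p.1 = p.2 <;> simp [h]
  have s1 : PySem.List.slice bin1.toList none (some 3) = bin1.toList.take 3 := by simp [pysem]
  have s2 : PySem.List.slice bin2.toList none (some 3) = bin2.toList.take 3 := by simp [pysem]
  have s3 : PySem.List.slice bin1.toList (some 3) none = bin1.toList.drop 3 := by simp [pysem]
  have s4 : PySem.List.slice bin2.toList (some 3) none = bin2.toList.drop 3 := by simp [pysem]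
  have n1 : PySem.List.slice bin1.toList (some 1) (some 5) = (bin1.toList.drop 1).take 4 := by
    simp [pysem]
  have n2 : PySem.List.slice bin2.toList (some 1) (some 5) = (bin2.toList.drop 1).take 4 := by
    simp [pysem]
  have nd : PySem.List.slice ((bin1.toList.zip bin2.toList).map (fun p => decide (p.1 ≠ p.2)))
      (some 1) (some 5)
      = (((bin1.toList.zip bin2.toList).map (fun p => decide (p.1 ≠ p.2))).drop 1).take 4 := by
    simp [pysem]
  simp only [s1, s2, s3, s4, n1, n2, nd, ← List.map_drop, ← List.map_take, List.map_map, hfun,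
    zip_take_eq, zip_drop_eq, Prod.mk.injEq]
  exact ⟨trivial, sum_map_take_drop _ _ 3, trivial⟩
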